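-- pv_equiv track=rewrite | github.com/CamiloMartinezM/ml-healthcare-project | utils/helpers.py | expected_poly_number_features
-- ===== SOURCE A (Python) =====
-- import math
--
-- def expected_poly_number_features(n_features: int, degree: int, total_columns: int) -> int:
--     """Calculate the expected number of features after applying `PolynomialFeatures` to `n_features`
--     columns with a given `degree`. The total number of columns in the dataset is `total_columns`.
--     Bias term is included in the calculation.
--
--     Parameters
--     ----------
--     n_features : int
--         Number of features to which polynomial transformation is applied.
--     degree : int
--         The degree of the polynomial features.
--     total_columns : int
--         The total number of columns in the original dataset.
--
--     Returns
--     -------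
--     int
--         The expected number of features after transformation.
--     """
--
--     def binomial_coefficient(n, k):
--         """Calculate the binomial coefficient C(n, k)."""
--         return math.factorial(n) // (math.factorial(k) * math.factorial(n - k))
--
--     if degree == 2:
--         return int((n_features + 2) * (n_features + 1) / 2) + (total_columns - n_features)
--     elif degree == 1:
--         return n_features + (total_columns - n_features) + 1  # Add 1 for the bias term
--
--     num_poly_features = sum(binomial_coefficient(n_features + i, i) for i in range(degree + 1))
--     remaining_features = total_columns - n_features
--     return num_poly_features + remaining_features
-- ===== SOURCE B (Python) =====
-- import math
--
-- def expected_poly_number_features(n_features: int, degree: int, total_columns: int) -> int: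
--     if degree == 2:
--         return (n_features + 2) * (n_features + 1) // 2 + (total_columns - n_features)
--     if degree == 1:
--         return total_columns + 1
--     # hockey-stick identity: sum_{i=0}^{d} C(n + i, i) = C(n + d + 1, d)
--     return math.comb(n_features + degree + 1, degree) + (total_columns - n_features)
-- ===== Notes on version B (the rewrite author's own statement) =====
-- stated objective: faster
-- what changed: The O(degree) loop of factorial-based binomials collapses via the hockey-stick identity to a single math.comb call, and the degree-2 branch uses exact integer floor division instead of float division; Pre_ excludes degree < 0, where A's value total_columns - n_features is only the accident of summing an empty range and B's math.comb raises ValueError.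
-- intended difference: For degree == 2 with (n_features+2)*(n_features+1)/2 at least 2^53 and not exactly representable as a double, A returns the float-rounded count because it divides with '/', while B returns the exact integer count via '//', which is the intended feature count. — e.g. on expected_poly_number_features(200000000, 2, 0): A returns 20000000100000000, B returns 20000000100000001
-- outside the precondition, e.g. on expected_poly_number_features(3, -1, 5): A returns 2, B raises ValueError
import Mathlib
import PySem

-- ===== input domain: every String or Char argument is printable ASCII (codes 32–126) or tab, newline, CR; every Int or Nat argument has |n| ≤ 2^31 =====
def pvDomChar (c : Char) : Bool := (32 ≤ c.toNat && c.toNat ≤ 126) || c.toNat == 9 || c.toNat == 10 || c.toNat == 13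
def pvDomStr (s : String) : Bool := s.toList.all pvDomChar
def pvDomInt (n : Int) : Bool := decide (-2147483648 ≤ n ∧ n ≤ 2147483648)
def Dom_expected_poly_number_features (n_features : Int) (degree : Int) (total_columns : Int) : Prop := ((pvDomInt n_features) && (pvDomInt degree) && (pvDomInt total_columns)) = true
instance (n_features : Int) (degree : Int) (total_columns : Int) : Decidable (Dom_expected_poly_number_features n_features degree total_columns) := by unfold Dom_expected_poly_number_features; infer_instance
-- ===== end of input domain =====

-- B replaces A's O(degree) factorial loop by one binomial via the hockey-stick identity and the
-- float division of the degree-2 branch by exact integer floor division (see D_ for the inputs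
-- where the float rounding makes A's value differ); Pre_ excludes degree < 0, where B raises.


-- ===== PORT A =====
-- math.factorial; exact for 0 ≤ n (Python raises ValueError for n < 0, excluded by Pre_)
def pvFact (n : Int) : Int := (Nat.factorial n.toNat : Int)

-- A's inner helper binomial_coefficient
def pvBinomialCoefficient (n k : Int) : Int :=
  PySem.Int.floordiv (pvFact n) (pvFact k * pvFact (n - k))

-- Exact model of CPython's int(p / 2) of A's degree-2 branch for m = p / 2 with p = (n+2)*(n+1),
-- which is always even and nonnegative: the true division returns the IEEE-754 double nearest to
-- the integer m (round to nearest, ties to even), an integer, so int() of it is itself.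
def pvFloatOfInt (m : Int) : Int :=
  if m < 2 ^ 53 then m
  else
    let s := PySem.Int.bitLength m - 53
    let q := m / (2 : Int) ^ s
    let r := m % (2 : Int) ^ s
    let half := (2 : Int) ^ (s - 1)
    (if half < r ∨ (r = half ∧ q % 2 = 1) then q + 1 else q) * 2 ^ s

def expected_poly_number_features (n_features : Int) (degree : Int) (total_columns : Int) : Int :=
  if degree = 2 then
    pvFloatOfInt (((n_features + 2) * (n_features + 1)) / 2) + (total_columns - n_features)
  else if degree = 1 then
    n_features + (total_columns - n_features) + 1
  else
    let num_poly_features :=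
      (PySem.List.pyRange 0 (degree + 1) 1).foldl
        (fun acc i => acc + pvBinomialCoefficient (n_features + i) i) 0
    let remaining_features := total_columns - n_features
    num_poly_features + remaining_features

-- ===== PORT B =====
def expected_poly_number_features_alt (n_features : Int) (degree : Int) (total_columns : Int) : Int :=
  if degree = 2 then
    PySem.Int.floordiv ((n_features + 2) * (n_features + 1)) 2 + (total_columns - n_features)
  else if degree = 1 then
    total_columns + 1
  else
    -- math.comb(n_features + degree + 1, degree); exact when both arguments are ≥ 0
    -- (inside Pre_ both are; Python raises ValueError otherwise, excluded by Pre_)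
    ((n_features + degree + 1).toNat.choose degree.toNat : Int) + (total_columns - n_features)

-- ===== PRECONDITION & SPEC =====
-- Pre_ excludes (a) the inputs where A raises: n_features < 0 with degree ≥ 0, degree ∉ {1, 2}
-- (math.factorial of a negative argument), and (b) degree < 0, where A's value
-- total_columns - n_features is only the accident of summing an empty range and B's math.comb
-- raises ValueError on a negative k.
def Pre_expected_poly_number_features (n_features : Int) (degree : Int) (total_columns : Int) : Prop :=
  degree = 1 ∨ degree = 2 ∨ (0 ≤ degree ∧ 0 ≤ n_features)

instance (n_features : Int) (degree : Int) (total_columns : Int) : Decidable (Pre_expected_poly_number_features n_features degree total_columns) := by unfold Pre_expected_poly_number_features; infer_instance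

def pvWitness_expected_poly_number_features : Int × Int × Int := (3, 3, 5)

-- For degree == 2 with (n_features+2)*(n_features+1)/2 at least 2^53 and not exactly representable
-- as an IEEE-754 double, A returns the float-rounded count (its '/' goes through a double) while B
-- returns the exact integer count via floor division, which is the intended number of features.
def D_expected_poly_number_features (n_features : Int) (degree : Int) (total_columns : Int) : Prop :=
  degree = 2 ∧
    2 ^ 54 ≤ (n_features ^ 2 + 3 * n_features + 2).toNat ∧
    ¬ ((2 : Nat) ^ ((n_features ^ 2 + 3 * n_features + 2).toNat.log2 - 52) ∣
        (n_features ^ 2 + 3 * n_features + 2).toNat)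

instance (n_features : Int) (degree : Int) (total_columns : Int) : Decidable (D_expected_poly_number_features n_features degree total_columns) := by unfold D_expected_poly_number_features; infer_instance

def Spec_expected_poly_number_features (n_features : Int) (degree : Int) (total_columns : Int) (out : Int) : Prop := ¬ D_expected_poly_number_features n_features degree total_columns → out = expected_poly_number_features_alt n_features degree total_columns
instance (n_features : Int) (degree : Int) (total_columns : Int) (out : Int) : Decidable (Spec_expected_poly_number_features n_features degree total_columns out) := by unfold Spec_expected_poly_number_features; infer_instance

def pvDiffWitness_expected_poly_number_features : Int × Int × Int := (200000000, 2, 0)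
def pvDiffWitnessOut_expected_poly_number_features : Int × Int := (20000000100000000, 20000000100000001)

-- ===== CLAIM (what is proved, stated in full; the proofs are below) =====
def Claim_unchanged_expected_poly_number_features : Prop := ∀ (n_features : Int) (degree : Int) (total_columns : Int), Dom_expected_poly_number_features n_features degree total_columns → Pre_expected_poly_number_features n_features degree total_columns → Spec_expected_poly_number_features n_features degree total_columns (expected_poly_number_features n_features degree total_columns)
def Claim_changed_expected_poly_number_features : Prop := Dom_expected_poly_number_features (pvDiffWitness_expected_poly_number_features.1) (pvDiffWitness_expected_poly_number_features.2.1) (pvDiffWitness_expected_poly_number_features.2.2) ∧ Pre_expected_poly_number_features (pvDiffWitness_expected_poly_number_features.1) (pvDiffWitness_expected_poly_number_features.2.1) (pvDiffWitness_expected_poly_number_features.2.2) ∧ D_expected_poly_number_features (pvDiffWitness_expected_poly_number_features.1) (pvDiffWitness_expected_poly_number_features.2.1) (pvDiffWitness_expected_poly_number_features.2.2) ∧ expected_poly_number_features (pvDiffWitness_expected_poly_number_features.1) (pvDiffWitness_expected_poly_number_features.2.1) (pvDiffWitness_expected_poly_number_features.2.2) = pvDiffWitnessOut_expected_poly_number_features.1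 ∧ expected_poly_number_features_alt (pvDiffWitness_expected_poly_number_features.1) (pvDiffWitness_expected_poly_number_features.2.1) (pvDiffWitness_expected_poly_number_features.2.2) = pvDiffWitnessOut_expected_poly_number_features.2 ∧ pvDiffWitnessOut_expected_poly_number_features.1 ≠ pvDiffWitnessOut_expected_poly_number_features.2
def Claim_exact_expected_poly_number_features : Prop := ∀ (n_features : Int) (degree : Int) (total_columns : Int), Dom_expected_poly_number_features n_features degree total_columns → Pre_expected_poly_number_features n_features degree total_columns → D_expected_poly_number_features n_features degree total_columns → expected_poly_number_features n_features degree total_columns ≠ expected_poly_number_features_alt n_features degree total_columns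

-- ===== LEMMAS AND PROOFS =====

-- (n+2)*(n+1) is even and nonnegative
theorem pvP_even_nonneg (n : Int) : (∃ k : Int, (n + 2) * (n + 1) = 2 * k) ∧ 0 ≤ (n + 2) * (n + 1) := by
  constructor
  · rcases Int.even_mul_succ_self (n + 1) with ⟨k, hk⟩
    exact ⟨k, by linear_combination hk⟩
  · have h4 : 0 ≤ 4 * ((n + 2) * (n + 1)) + 1 := by nlinarith [sq_nonneg (2 * n + 3)]
    set p := (n + 2) * (n + 1)
    omega

-- representable integers are fixed by the rounding
theorem pvFloatOfInt_eq_self (m : Int) (h0 : 0 ≤ m)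
    (h : m < 2 ^ 53 ∨ (2 : Int) ^ (PySem.Int.bitLength m - 53) ∣ m) :
    pvFloatOfInt m = m := by
  unfold pvFloatOfInt
  split
  · rfl
  · rename_i hge
    push_neg at hge
    rcases h with h | hdvd
    · omega
    · show (if (2 : Int) ^ (PySem.Int.bitLength m - 53 - 1) < m % 2 ^ (PySem.Int.bitLength m - 53) ∨
          (m % 2 ^ (PySem.Int.bitLength m - 53) = 2 ^ (PySem.Int.bitLength m - 53 - 1) ∧
            m / 2 ^ (PySem.Int.bitLength m - 53) % 2 = 1)
          then m / 2 ^ (PySem.Int.bitLength m - 53) + 1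
          else m / 2 ^ (PySem.Int.bitLength m - 53)) * 2 ^ (PySem.Int.bitLength m - 53) = m
      have hr : m % (2 : Int) ^ (PySem.Int.bitLength m - 53) = 0 :=
        Int.emod_eq_zero_of_dvd hdvd
      rw [hr]
      have hhalf : (0 : Int) < 2 ^ (PySem.Int.bitLength m - 53 - 1) := by positivity
      rw [if_neg (by intro hc; rcases hc with hc | ⟨hc, _⟩ <;> omega)]
      exact Int.ediv_mul_cancel hdvd

-- the rounding moves every non-representable integer
theorem pvFloatOfInt_ne_self (m : Int)
    (hge : 2 ^ 53 ≤ m)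
    (hnd : ¬ ((2 : Int) ^ (PySem.Int.bitLength m - 53) ∣ m)) :
    pvFloatOfInt m ≠ m := by
  have h : (2 : Int) ^ (PySem.Int.bitLength m - 53) ∣ pvFloatOfInt m := by
    unfold pvFloatOfInt
    rw [if_neg (by omega)]
    show (2 : Int) ^ (PySem.Int.bitLength m - 53) ∣
      (if (2 : Int) ^ (PySem.Int.bitLength m - 53 - 1) < m % 2 ^ (PySem.Int.bitLength m - 53) ∨
          (m % 2 ^ (PySem.Int.bitLength m - 53) = 2 ^ (PySem.Int.bitLength m - 53 - 1) ∧
            m / 2 ^ (PySem.Int.bitLength m - 53) % 2 = 1)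
          then m / 2 ^ (PySem.Int.bitLength m - 53) + 1
          else m / 2 ^ (PySem.Int.bitLength m - 53)) * 2 ^ (PySem.Int.bitLength m - 53)
    exact ⟨_, mul_comm _ _⟩
  intro heq
  rw [heq] at h
  exact hnd h

-- A's factorial binomial is Nat.choose for 0 ≤ k ≤ n
theorem pvBinomialCoefficient_eq (n k : Int) (hk : 0 ≤ k) (hkn : k ≤ n) :
    pvBinomialCoefficient n k = (n.toNat.choose k.toNat : Int) := by
  unfold pvBinomialCoefficient pvFact
  have hsub : (n - k).toNat = n.toNat - k.toNat := by omega
  rw [hsub]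
  have hmul : ((k.toNat.factorial : Int)) * ((n.toNat - k.toNat).factorial : Int)
      = (((k.toNat.factorial * (n.toNat - k.toNat).factorial : Nat)) : Int) := by push_cast; ring
  rw [hmul, PySem.Int.floordiv_natCast]
  congr 1
  have hle : k.toNat ≤ n.toNat := by omega
  have hch := Nat.choose_mul_factorial_mul_factorial hle
  have : n.toNat.factorial = n.toNat.choose k.toNat * (k.toNat.factorial * (n.toNat - k.toNat).factorial) := by
    rw [← hch]; ring
  rw [this, Nat.mul_div_cancel _ (Nat.mul_pos (Nat.factorial_pos _) (Nat.factorial_pos _))]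

-- hockey stick: ∑_{i=0}^{D} C(N+i, i) = C(N+D+1, D)
theorem pvHockeyStick (N D : Nat) :
    (((List.range (D + 1)).map (fun i => (N + i).choose i)).sum) = (N + D + 1).choose D := by
  induction D with
  | zero => simp
  | succ d ih =>
    rw [List.range_succ, List.map_append, List.sum_append, ih]
    have hx : N + (d + 1) = N + d + 1 := by omega
    simp only [List.map_cons, List.map_nil, List.sum_cons, List.sum_nil, hx]
    have h := Nat.choose_succ_succ (N + d + 1) d
    simp only [Nat.succ_eq_add_one] at h
    omega

theorem pvLoop_eq (n d : Int) (hn : 0 ≤ n) (hd : 0 ≤ d) :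
    (PySem.List.pyRange 0 (d + 1) 1).foldl
        (fun acc i => acc + pvBinomialCoefficient (n + i) i) 0
      = ((n + d + 1).toNat.choose d.toNat : Int) := by
  have hd1 : d + 1 = ((d.toNat + 1 : Nat) : Int) := by omega
  rw [hd1, PySem.List.pyRange_zero_natCast, PySem.List.foldl_add, List.map_map]
  have hmap : ((List.range (d.toNat + 1)).map ((fun i => pvBinomialCoefficient (n + i) i) ∘ Nat.cast))
      = (List.range (d.toNat + 1)).map (fun i => ((n.toNat + i).choose i : Int)) := by
    apply List.map_congr_left
    intro i _
    simp only [Function.comp]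
    rw [pvBinomialCoefficient_eq (n + i) i (by omega) (by omega)]
    congr 2
    omega
  rw [hmap]
  rw [show (List.range (d.toNat + 1)).map (fun i => (((n.toNat + i).choose i : Nat) : Int))
      = ((List.range (d.toNat + 1)).map (fun i => (n.toNat + i).choose i)).map Nat.cast from by
    rw [List.map_map]; rfl]
  rw [← Nat.cast_list_sum, pvHockeyStick]
  have ht : (n + d + 1).toNat = n.toNat + d.toNat + 1 := by omega
  rw [ht]
  omega

-- D_'s divisibility over the quadratic (stated with Nat.log2) is exactly representability of the
-- halved product as a 53-bit float significand
theorem pvBridge (m : Int) (hm : 2 ^ 53 ≤ m) :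
    ((2 : Nat) ^ ((2 * m.toNat).log2 - 52) ∣ 2 * m.toNat) ↔
      ((2 : Int) ^ (PySem.Int.bitLength m - 53) ∣ m) := by
  have hm0 : m ≠ 0 := by omega
  have hna : m.natAbs = m.toNat := by omega
  have h1 := PySem.Int.two_pow_bitLength_le m hm0
  have h2 := PySem.Int.lt_two_pow_bitLength m
  rw [hna] at h1 h2
  set bl := PySem.Int.bitLength m with hbl
  have hbl54 : 54 ≤ bl := by
    by_contra hc
    have : m.toNat < 2 ^ 53 :=
      lt_of_lt_of_le h2 (Nat.pow_le_pow_right (by norm_num) (by omega))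
    omega
  have hq0 : 2 * m.toNat ≠ 0 := by omega
  have hlog : (2 * m.toNat).log2 = bl := by
    have ha : 2 ^ bl ≤ 2 * m.toNat := by
      have hpw : (2 : Nat) ^ bl = 2 * 2 ^ (bl - 1) := by
        rw [← pow_succ']
        congr 1
        omega
      omega
    have hb : 2 * m.toNat < 2 ^ (bl + 1) := by
      have hpw : (2 : Nat) ^ (bl + 1) = 2 * 2 ^ bl := by rw [pow_succ']
      omega
    have hlo := (Nat.le_log2 hq0).mpr ha
    have hhi := (Nat.log2_lt hq0).mpr hb
    omega
  rw [hlog]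
  have hexp : bl - 52 = (bl - 53) + 1 := by omega
  rw [hexp]
  have hstep : ((2 : Nat) ^ ((bl - 53) + 1) ∣ 2 * m.toNat) ↔ (2 : Nat) ^ (bl - 53) ∣ m.toNat := by
    rw [pow_succ', Nat.mul_dvd_mul_iff_left (by norm_num : 0 < 2)]
  rw [hstep]
  have hmc : m = (m.toNat : Int) := by omega
  rw [hmc, show ((2 : Int) ^ (bl - 53)) = (((2 ^ (bl - 53) : Nat)) : Int) from by push_cast; ring,
    Int.natCast_dvd_natCast, Int.toNat_natCast]

-- ===== VERDICT =====
theorem expected_poly_number_features_spec : Claim_unchanged_expected_poly_number_features := by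
  intro n d t _ hpre hD
  unfold expected_poly_number_features expected_poly_number_features_alt
  by_cases h2 : d = 2
  · subst h2
    rw [if_pos rfl, if_pos rfl]
    obtain ⟨⟨k, hk⟩, hpos⟩ := pvP_even_nonneg n
    set p := (n + 2) * (n + 1) with hp
    have hm : p / 2 = k := by omega
    have hfd : PySem.Int.floordiv p 2 = p / 2 := PySem.Int.floordiv_eq_ediv_of_pos (by omega)
    unfold D_expected_poly_number_features at hD
    push_neg at hD
    have hquad : n ^ 2 + 3 * n + 2 = p := by rw [hp]; ring
    rw [hquad] at hD
    have hor : p / 2 < 2 ^ 53 ∨ (2 : Int) ^ (PySem.Int.bitLength (p / 2) - 53) ∣ p / 2 := by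
      by_cases hlt : p / 2 < 2 ^ 53
      · exact Or.inl hlt
      · refine Or.inr ?_
        have hdq := hD rfl (by omega)
        have hq2 : p.toNat = 2 * (p / 2).toNat := by omega
        rw [hq2] at hdq
        exact (pvBridge (p / 2) (by omega)).mp hdq
    rw [pvFloatOfInt_eq_self (p / 2) (by omega) hor, hfd]
  · by_cases h1 : d = 1
    · subst h1
      rw [if_neg (by decide), if_pos rfl, if_neg (by decide), if_pos rfl]
      omega
    · rw [if_neg h2, if_neg h1, if_neg h2, if_neg h1]
      have hn : 0 ≤ n ∧ 0 ≤ d := by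
        unfold Pre_expected_poly_number_features at hpre
        rcases hpre with h | h | ⟨ha, hb⟩ <;> first | omega | exact ⟨hb, ha⟩
      simp only []
      rw [pvLoop_eq n d hn.1 hn.2]

theorem expected_poly_number_features_changed : Claim_changed_expected_poly_number_features := by
  unfold Claim_changed_expected_poly_number_features
  decide

theorem expected_poly_number_features_tight : Claim_exact_expected_poly_number_features := by
  intro n d t _ _ hD
  obtain ⟨h2, hge, hnd⟩ := hD
  subst h2
  unfold expected_poly_number_features expected_poly_number_features_alt
  rw [if_pos rfl, if_pos rfl]
  obtain ⟨⟨k, hk⟩, hpos⟩ := pvP_even_nonneg n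
  set p := (n + 2) * (n + 1) with hp
  have hquad : n ^ 2 + 3 * n + 2 = p := by rw [hp]; ring
  rw [hquad] at hge hnd
  have hfd : PySem.Int.floordiv p 2 = p / 2 := PySem.Int.floordiv_eq_ediv_of_pos (by omega)
  rw [hfd]
  have hq2 : p.toNat = 2 * (p / 2).toNat := by omega
  rw [hq2] at hnd
  have hm53 : 2 ^ 53 ≤ p / 2 := by omega
  have hnd' : ¬ ((2 : Int) ^ (PySem.Int.bitLength (p / 2) - 53) ∣ p / 2) := fun hc =>
    hnd ((pvBridge (p / 2) hm53).mpr hc)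
  have := pvFloatOfInt_ne_self (p / 2) hm53 hnd'
  omega
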